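-- pv_equiv track=rewrite | github.com/vlad-marlo/ege_it | tests/entry_test/17/code.py | solution
-- ===== SOURCE A (Python) =====
-- from typing import List, Tuple
--
-- def check(first: int, second: int) -> bool:
--     return ((first + second) % 60 == 0) and (first % 40 == 0 or second % 40 == 0)
--
-- def solution(data: List[int]) -> Tuple[int, int]:
--     max_summ, count = 0, 0
--     first, second = None, None
--     for first in range(len(data) - 1):
--         for second in range(first, len(data)):
--             if check(data[first], data[second]):
--                 max_summ = max(data[first] + data[second], max_summ)
--                 count += 1
--     return count, max_summ
-- ===== SOURCE B (Python) =====
-- from typing import List, Tuple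
--
-- def solution(data: List[int]) -> Tuple[int, int]:
--     # One pass: bucket values by residue mod 120 (count and max per class);
--     # whether a pair qualifies depends only on these residues, so each element
--     # pairs with at most two partner residue classes.
--     count, max_summ = 0, 0
--     buckets = {}  # residue mod 120 -> (count, max) over elements seen so far
--     for v in data:
--         r = v % 120
--         if r in buckets:
--             c, m = buckets[r]
--             buckets[r] = (c + 1, max(m, v))
--         else:
--             buckets[r] = (1, v)
--         t = -v % 60
--         if v % 40 == 0:
--             partners = [t, t + 60]
--         else:
--             partners = [s for s in (t, t + 60) if s % 40 == 0]
--         for s in partners: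
--             if s in buckets:
--                 c, m = buckets[s]
--                 count += c
--                 max_summ = max(max_summ, m + v)
--     return count, max_summ
-- ===== Notes on version B (the rewrite author's own statement) =====
-- stated objective: faster
-- what changed: Replaces the quadratic all-pairs double loop by a single forward pass that buckets values by residue mod 120 (count and max per class) and lets each element query its at-most-two partner residue classes, since the qualifying condition depends only on residues mod 120.
-- intended difference: On inputs whose LAST element is divisible by 120, A's outer loop stops at n-2 so the last element is the only one never paired with itself, while B treats all indices alike and counts the pair (n-1,n-1) too (one more pair, and its sum enters the maximum); B's uniform treatment is the intended behaviour. — e.g. on solution([120]): A returns (0, 0), B returns (1, 240)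
import Mathlib
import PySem

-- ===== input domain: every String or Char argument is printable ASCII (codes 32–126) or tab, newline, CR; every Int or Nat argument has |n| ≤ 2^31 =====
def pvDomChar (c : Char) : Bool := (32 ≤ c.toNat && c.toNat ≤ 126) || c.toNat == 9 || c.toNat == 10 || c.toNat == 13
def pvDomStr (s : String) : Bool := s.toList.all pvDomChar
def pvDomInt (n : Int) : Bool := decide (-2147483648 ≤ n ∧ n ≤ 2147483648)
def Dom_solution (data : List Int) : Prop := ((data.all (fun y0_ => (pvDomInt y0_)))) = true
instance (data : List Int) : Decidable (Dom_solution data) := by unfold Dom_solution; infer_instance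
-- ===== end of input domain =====

-- B replaces A's quadratic all-pairs double loop by one forward pass over residue-mod-120
-- buckets; A and B agree except when the last element is divisible by 120 (see D_ below).

-- ===== PORT A =====
def pvCheck (first second : Int) : Bool :=
  (PySem.Int.mod (first + second) 60 == 0) &&
    (PySem.Int.mod first 40 == 0 || PySem.Int.mod second 40 == 0)

def solution (data : List Int) : Int × Int :=
  let st :=
    (PySem.List.pyRange 0 ((data.length : Int) - 1) 1).foldl (fun st first =>
      (PySem.List.pyRange first (data.length : Int) 1).foldl (fun st second =>
        if pvCheck (PySem.List.pyGetD data first 0) (PySem.List.pyGetD data second 0) then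
          (max (PySem.List.pyGetD data first 0 + PySem.List.pyGetD data second 0) st.1, st.2 + 1)
        else st) st) ((0 : Int), (0 : Int))
  (st.2, st.1)

-- ===== PORT B =====
def pvPartners (v : Int) : List Int :=
  let t := PySem.Int.mod (-v) 60
  if PySem.Int.mod v 40 == 0 then [t, t + 60]
  else [t, t + 60].filter (fun s => PySem.Int.mod s 40 == 0)

def pvStep (st : Int × Int × PySem.Dict Int (Int × Int)) (v : Int) :
    Int × Int × PySem.Dict Int (Int × Int) :=
  let buckets :=
    match st.2.2.get? (PySem.Int.mod v 120) with
    | some cm => st.2.2.insert (PySem.Int.mod v 120) (cm.1 + 1, max cm.2 v)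
    | none => st.2.2.insert (PySem.Int.mod v 120) (1, v)
  let cm := (pvPartners v).foldl (fun p s =>
      match buckets.get? s with
      | some cm => (p.1 + cm.1, max p.2 (cm.2 + v))
      | none => p) (st.1, st.2.1)
  (cm.1, cm.2, buckets)

def solution_alt (data : List Int) : Int × Int :=
  let st := data.foldl pvStep ((0 : Int), (0 : Int), PySem.Dict.empty)
  (st.1, st.2.1)

-- ===== PRECONDITION & SPEC =====
-- On inputs whose last element is divisible by 120, A's outer loop stops at n-2, so the last
-- element is the only index never paired with itself; B treats all indices alike and also
-- counts the pair (n-1, n-1), which is the intended uniform behaviour.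
def D_solution (data : List Int) : Prop :=
  PySem.Int.mod (data.getLast?.getD 1) 120 = 0
instance (data : List Int) : Decidable (D_solution data) := by unfold D_solution; infer_instance

def Spec_solution (data : List Int) (out : Int × Int) : Prop :=
  ¬ D_solution data → out = solution_alt data
instance (data : List Int) (out : Int × Int) : Decidable (Spec_solution data out) := by unfold Spec_solution; infer_instance

def pvDiffWitness_solution : List Int := [120]
def pvDiffWitnessOut_solution : (Int × Int) × (Int × Int) := ((0, 0), (1, 240))

-- ===== CLAIM (what is proved, stated in full; the proofs are below) =====
def Claim_unchanged_solution : Prop := ∀ (data : List Int), Dom_solution data → Spec_solution data (solution data)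
def Claim_changed_solution : Prop := Dom_solution (pvDiffWitness_solution) ∧ D_solution (pvDiffWitness_solution) ∧ solution (pvDiffWitness_solution) = pvDiffWitnessOut_solution.1 ∧ solution_alt (pvDiffWitness_solution) = pvDiffWitnessOut_solution.2 ∧ pvDiffWitnessOut_solution.1 ≠ pvDiffWitnessOut_solution.2
def Claim_exact_solution : Prop := ∀ (data : List Int), Dom_solution data → D_solution data → solution data ≠ solution_alt data

-- ===== LEMMAS AND PROOFS =====

-- value at an index, pair sum, qualifying test
def pvG (data : List Int) (i : Int) : Int := PySem.List.pyGetD data i 0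
def pvS (data : List Int) (p : Int × Int) : Int := pvG data p.1 + pvG data p.2
def pvQ (data : List Int) (p : Int × Int) : Bool := pvCheck (pvG data p.1) (pvG data p.2)

-- A's qualifying pairs, row-major (outer index first)
def pvRowA (data : List Int) (i : Int) : List (Int × Int) :=
  ((PySem.List.pyRange i (data.length : Int) 1).filter (fun j => pvQ data (i, j))).map
    (fun j => (i, j))
def pvLA (data : List Int) : List (Int × Int) :=
  (PySem.List.pyRange 0 ((data.length : Int) - 1) 1).flatMap (pvRowA data)

-- B's qualifying pairs, column-major (second index first; i runs up to and including j)
def pvRowB (data : List Int) (j : Int) : List (Int × Int) :=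
  ((PySem.List.pyRange 0 (j + 1) 1).filter (fun i => pvQ data (i, j))).map (fun i => (i, j))
def pvLB (data : List Int) (k : Int) : List (Int × Int) :=
  (PySem.List.pyRange 0 k 1).flatMap (pvRowB data)

-- bucket contents as a fold over the class members
def pvBump (o : Option (Int × Int)) (u : Int) : Option (Int × Int) :=
  match o with
  | none => some (1, u)
  | some cm => some (cm.1 + 1, max cm.2 u)
def pvBucket (pre : List Int) (r : Int) : Option (Int × Int) :=
  (pre.filter (fun u => PySem.Int.mod u 120 == r)).foldl pvBump none

-- loop invariant of B after the first k elements
def pvInv (data : List Int) (k : Nat) (st : Int × Int × PySem.Dict Int (Int × Int)) : Prop :=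
  st.1 = ((pvLB data k).length : Int) ∧
  st.2.1 = ((pvLB data k).map (pvS data)).foldl max 0 ∧
  ∀ r, st.2.2.get? r = pvBucket (data.take k) r

lemma pv_foldl_max_count {α : Type} (q : α → Bool) (f : α → Int) (l : List α) :
    ∀ st : Int × Int,
    l.foldl (fun st x => if q x then (max (f x) st.1, st.2 + 1) else st) st
      = (((l.filter q).map f).foldl max st.1, st.2 + ((l.filter q).length : Int)) := by
  induction l with
  | nil => intro st; simp
  | cons x xs ih =>
    intro st
    simp only [List.foldl_cons]
    by_cases hx : q x = true
    · rw [if_pos hx, ih]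
      simp only [List.filter_cons, hx, if_pos, List.map_cons, List.foldl_cons, List.length_cons]
      refine Prod.ext ?_ ?_
      · simp [max_comm]
      · simp; ring
    · rw [if_neg hx, ih]
      simp [hx]

lemma pv_foldl_rows {α : Type} (rows : α → List (Int × Int)) (f : Int × Int → Int) (l : List α) :
    ∀ st : Int × Int,
    l.foldl (fun st x => (((rows x).map f).foldl max st.1, st.2 + ((rows x).length : Int))) st
      = (((l.flatMap rows).map f).foldl max st.1, st.2 + ((l.flatMap rows).length : Int)) := by
  induction l with
  | nil => intro st; simp
  | cons x xs ih =>
    intro st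
    simp only [List.foldl_cons, List.flatMap_cons, List.map_append, List.foldl_append,
      List.length_append]
    rw [ih]
    refine Prod.ext ?_ ?_
    · simp
    · simp; ring

lemma pv_foldl_max_perm {l₁ l₂ : List Int} (h : l₁.Perm l₂) (m0 : Int) :
    l₁.foldl max m0 = l₂.foldl max m0 :=
  @List.Perm.foldl_eq _ _ max _ _
    ⟨fun b a₁ a₂ => by rw [max_assoc, max_comm a₁ a₂, ← max_assoc]⟩ h m0

lemma pv_innerA (data : List Int) (first : Int) (st : Int × Int) :
    (PySem.List.pyRange first (data.length : Int) 1).foldl (fun st second =>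
        if pvCheck (PySem.List.pyGetD data first 0) (PySem.List.pyGetD data second 0) then
          (max (PySem.List.pyGetD data first 0 + PySem.List.pyGetD data second 0) st.1, st.2 + 1)
        else st) st
      = (((pvRowA data first).map (pvS data)).foldl max st.1,
         st.2 + ((pvRowA data first).length : Int)) := by
  simp only [pv_foldl_max_count]
  simp [pvRowA, pvQ, pvS, pvG, List.map_map, Function.comp_def]

lemma pv_solution_eq (data : List Int) :
    solution data = (((pvLA data).length : Int), ((pvLA data).map (pvS data)).foldl max 0) := by
  unfold solution
  simp only [pv_innerA]
  simp only [pv_foldl_rows]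
  simp [pvLA]

lemma pv_bump_foldl_some (l : List Int) : ∀ (c m : Int),
    l.foldl pvBump (some (c, m)) = some (c + (l.length : Int), l.foldl max m) := by
  induction l with
  | nil => intro c m; simp
  | cons u us ih =>
    intro c m
    simp only [List.foldl_cons, pvBump, List.length_cons, ih]
    refine congrArg some (Prod.ext ?_ ?_)
    · simp; ring
    · simp

lemma pv_partners_nodup (v : Int) : (pvPartners v).Nodup := by
  unfold pvPartners
  split
  · simp only [List.nodup_cons, List.mem_singleton, List.not_mem_nil, not_false_iff,
      List.nodup_nil, and_true]
    omega
  · refine List.Nodup.filter _ ?_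
    simp only [List.nodup_cons, List.mem_singleton, List.not_mem_nil, not_false_iff,
      List.nodup_nil, and_true]
    omega

lemma pv_check_mem_partners (u v : Int) :
    pvCheck u v = (pvPartners v).contains (PySem.Int.mod u 120) := by
  have e60 : ∀ a : Int, PySem.Int.mod a 60 = a % 60 :=
    fun a => PySem.Int.mod_eq_emod_of_pos (by norm_num)
  have e40 : ∀ a : Int, PySem.Int.mod a 40 = a % 40 :=
    fun a => PySem.Int.mod_eq_emod_of_pos (by norm_num)
  have e120 : ∀ a : Int, PySem.Int.mod a 120 = a % 120 :=
    fun a => PySem.Int.mod_eq_emod_of_pos (by norm_num)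
  rw [Bool.eq_iff_iff]
  simp only [pvCheck, pvPartners, e60, e40, e120, Bool.and_eq_true, Bool.or_eq_true, beq_iff_eq]
  by_cases h40 : v % 40 = 0
  · rw [if_pos (by simpa using h40)]
    simp only [List.contains_eq_mem, List.mem_cons, List.not_mem_nil, or_false,
      decide_eq_true_eq]
    constructor
    · rintro ⟨h1, -⟩
      omega
    · intro h
      exact ⟨by omega, Or.inr h40⟩
  · rw [if_neg (by simpa using h40)]
    simp only [List.filter_cons, List.filter_nil]
    by_cases ht : (-v) % 60 % 40 = 0
    · rw [if_pos (by simpa using ht), if_neg (by simp only [beq_iff_eq]; omega)]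
      simp only [List.contains_eq_mem, List.mem_cons, List.not_mem_nil, or_false,
        decide_eq_true_eq]
      constructor
      · rintro ⟨h1, h2 | h2⟩
        · omega
        · exact absurd h2 h40
      · intro h
        exact ⟨by omega, Or.inl (by omega)⟩
    · rw [if_neg (by simpa using ht)]
      by_cases ht2 : ((-v) % 60 + 60) % 40 = 0
      · rw [if_pos (by simpa using ht2)]
        simp only [List.contains_eq_mem, List.mem_cons, List.not_mem_nil, or_false,
          decide_eq_true_eq]
        constructor
        · rintro ⟨h1, h2 | h2⟩
          · omega
          · exact absurd h2 h40
        · intro h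
          exact ⟨by omega, Or.inl (by omega)⟩
      · rw [if_neg (by simpa using ht2)]
        simp only [List.contains_eq_mem, List.not_mem_nil, decide_eq_true_eq, iff_false]
        rintro ⟨h1, h2 | h2⟩
        · omega
        · exact h40 h2

lemma pv_check_diag (v : Int) : pvCheck v v = (PySem.Int.mod v 120 == 0) := by
  rw [Bool.eq_iff_iff]
  simp only [pvCheck, Bool.and_eq_true, Bool.or_eq_true, beq_iff_eq,
    PySem.Int.mod_eq_zero_iff_dvd]
  omega

lemma pv_filter_or_perm {α : Type} (p q : α → Bool) (l : List α)
    (h : ∀ x, p x = true → q x = false) :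
    (l.filter (fun x => p x || q x)).Perm (l.filter p ++ l.filter q) := by
  induction l with
  | nil => simp
  | cons x xs ih =>
    by_cases hp : p x = true
    · have hq := h x hp
      simp only [List.filter_cons, hp, hq, Bool.true_or, if_pos, Bool.false_eq_true, if_false]
      exact ih.cons x
    · by_cases hq : q x = true
      · simp only [List.filter_cons, hp, hq, Bool.false_or, if_pos, Bool.false_eq_true, if_false]
        exact (ih.cons x).trans List.perm_middle.symm
      · simp only [List.filter_cons, hp, hq, Bool.or_self, Bool.false_eq_true, if_false]
        exact ih

lemma pv_foldl_max_map_add (us : List Int) : ∀ (u m0 v : Int),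
    (((u :: us).map (· + v)).foldl max m0) = max m0 (us.foldl max u + v) := by
  induction us with
  | nil => intro u m0 v; simp
  | cons w ws ih =>
    intro u m0 v
    simp only [List.map_cons, List.foldl_cons] at *
    rw [ih w (max m0 (u + v)) v, List.foldl_assoc, max_add, max_assoc]

lemma pv_partnerFold (pre : List Int) (v : Int) (d : PySem.Dict Int (Int × Int))
    (hd : ∀ r, d.get? r = pvBucket pre r) :
    ∀ ps : List Int, ps.Nodup → ∀ c0 m0 : Int,
    ps.foldl (fun p s =>
        match d.get? s with
        | some cm => (p.1 + cm.1, max p.2 (cm.2 + v))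
        | none => p) (c0, m0)
      = (c0 + ((pre.filter (fun u => ps.contains (PySem.Int.mod u 120))).length : Int),
         ((pre.filter (fun u => ps.contains (PySem.Int.mod u 120))).map (· + v)).foldl max m0) := by
  intro ps
  induction ps with
  | nil => intro _ c0 m0; simp
  | cons s ps ih =>
    intro hnd c0 m0
    have hs : s ∉ ps := (List.nodup_cons.mp hnd).1
    have hnd' : ps.Nodup := (List.nodup_cons.mp hnd).2
    have hcong : ∀ u ∈ pre, ((s :: ps).contains (PySem.Int.mod u 120))
        = ((PySem.Int.mod u 120 == s) || ps.contains (PySem.Int.mod u 120)) := by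
      intro u _
      simp [List.contains_eq_mem, beq_eq_decide]
    have hperm : (pre.filter (fun u => (s :: ps).contains (PySem.Int.mod u 120))).Perm
        ((pre.filter (fun u => PySem.Int.mod u 120 == s)) ++
          pre.filter (fun u => ps.contains (PySem.Int.mod u 120))) := by
      rw [List.filter_congr hcong]
      apply pv_filter_or_perm
      intro x hx
      simp only [beq_iff_eq] at hx
      rw [hx]
      simpa [List.contains_eq_mem] using hs
    have hlen := hperm.length_eq
    have hfold : ∀ m : Int,
        ((pre.filter (fun u => (s :: ps).contains (PySem.Int.mod u 120))).map (· + v)).foldl max m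
        = ((pre.filter (fun u => ps.contains (PySem.Int.mod u 120))).map (· + v)).foldl max
            (((pre.filter (fun u => PySem.Int.mod u 120 == s)).map (· + v)).foldl max m) := by
      intro m
      rw [pv_foldl_max_perm (hperm.map _) m, List.map_append, List.foldl_append]
    rcases hcl : pre.filter (fun u => PySem.Int.mod u 120 == s) with _ | ⟨u, us⟩
    · have hb : pvBucket pre s = none := by unfold pvBucket; rw [hcl]; rfl
      simp only [List.foldl_cons, hd s, hb]
      rw [ih hnd' c0 m0]
      rw [hcl] at hlen hfold
      refine Prod.ext ?_ ?_
      · simp only []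
        simp only [List.nil_append] at hlen
        omega
      · simp only []
        rw [hfold m0]
        simp
    · have hb : pvBucket pre s = some (1 + (us.length : Int), us.foldl max u) := by
        unfold pvBucket
        rw [hcl]
        simp only [List.foldl_cons, pvBump]
        rw [pv_bump_foldl_some]
      simp only [List.foldl_cons, hd s, hb]
      rw [ih hnd' (c0 + (1 + (us.length : Int))) (max m0 (us.foldl max u + v))]
      rw [hcl] at hlen hfold
      refine Prod.ext ?_ ?_
      · simp only []
        rw [List.length_append, List.length_cons] at hlen
        omega
      · simp only []
        rw [hfold m0, pv_foldl_max_map_add]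

lemma pv_range_map_get (data : List Int) (k : Nat) (hk : k ≤ data.length) :
    (PySem.List.pyRange 0 (k : Int) 1).map (pvG data) = data.take k := by
  rw [PySem.List.pyRange_one]
  simp only [Int.sub_zero, Int.toNat_natCast, List.map_map]
  apply List.ext_getElem
  · simp [Nat.min_eq_left hk]
  · intro i h1 h2
    simp only [List.getElem_map, List.getElem_range, Function.comp_apply, List.getElem_take]
    have hi : i < k := by simpa using h1
    have hi2 : i < data.length := lt_of_lt_of_le hi hk
    simp [pvG, PySem.List.pyGetD_natCast, hi2]

lemma pv_LB_succ (data : List Int) (k : Nat) :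
    pvLB data ((k : Nat) + 1 : Nat) = pvLB data k ++ pvRowB data k := by
  unfold pvLB
  have h0 : ((k + 1 : Nat) : Int) = (k : Int) + 1 := by push_cast; ring
  rw [h0, PySem.List.pyRange_one_succ_right (by positivity), List.flatMap_append]
  simp

lemma pv_bucket_append (pre : List Int) (v r : Int) :
    pvBucket (pre ++ [v]) r
      = if PySem.Int.mod v 120 == r then pvBump (pvBucket pre r) v else pvBucket pre r := by
  unfold pvBucket
  rw [List.filter_append, List.foldl_append]
  simp only [List.filter_cons, List.filter_nil]
  split
  · simp
  · simp

lemma pv_step_inv (data pre l' : List Int) (v : Int) (h : data = pre ++ v :: l')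
    (st : Int × Int × PySem.Dict Int (Int × Int)) (hInv : pvInv data pre.length st) :
    pvInv data (pre.length + 1) (pvStep st v) := by
  obtain ⟨hc, hm, hd⟩ := hInv
  have hklen : pre.length < data.length := by rw [h]; simp
  have htake : data.take pre.length = pre := by rw [h]; exact List.take_left
  have htake1 : data.take (pre.length + 1) = pre ++ [v] := by
    have h2 : data = (pre ++ [v]) ++ l' := by simp [h]
    have hl : pre.length + 1 = (pre ++ [v]).length := by simp
    rw [h2, hl]
    exact List.take_left
  have hv : pvG data ((pre.length : Int)) = v := by
    simp only [pvG, PySem.List.pyGetD_natCast]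
    rw [h]
    simp [List.getD]
  have hdpre : ∀ r, st.2.2.get? r = pvBucket pre r := fun r => by rw [hd r, htake]
  have hbuckets : ∀ r,
      (match st.2.2.get? (PySem.Int.mod v 120) with
        | some cm => st.2.2.insert (PySem.Int.mod v 120) (cm.1 + 1, max cm.2 v)
        | none => st.2.2.insert (PySem.Int.mod v 120) (1, v)).get? r
        = pvBucket (pre ++ [v]) r := by
    intro r
    rw [pv_bucket_append, hdpre (PySem.Int.mod v 120)]
    by_cases hr : PySem.Int.mod v 120 = r
    · subst hr
      rw [if_pos (by simp : (PySem.Int.mod v 120 == PySem.Int.mod v 120) = true)]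
      cases hbk : pvBucket pre (PySem.Int.mod v 120) with
      | none => rw [PySem.Dict.get?_insert_self]; rfl
      | some cm => rw [PySem.Dict.get?_insert_self]; rfl
    · rw [if_neg (by simpa using hr)]
      cases hbk : pvBucket pre (PySem.Int.mod v 120) with
      | none => rw [PySem.Dict.get?_insert, if_neg (fun hh => hr hh.symm), hdpre r]
      | some cm => rw [PySem.Dict.get?_insert, if_neg (fun hh => hr hh.symm), hdpre r]
  have hmapg : (PySem.List.pyRange 0 ((pre.length : Int) + 1) 1).map (pvG data) = pre ++ [v] := by
    have hcast : ((pre.length : Int) + 1) = (((pre.length + 1 : Nat)) : Int) := by push_cast; ring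
    rw [hcast, pv_range_map_get data (pre.length + 1) (by omega), htake1]
  have hGmap : (pre ++ [v]).filter (fun u => pvCheck u v)
      = ((PySem.List.pyRange 0 ((pre.length : Int) + 1) 1).filter
          (fun i => pvQ data (i, (pre.length : Int)))).map (pvG data) := by
    conv_lhs => rw [← hmapg]
    rw [List.filter_map]
    congr 1
    apply List.filter_congr
    intro i _
    simp only [Function.comp_apply, pvQ, hv]
  have hFc : (pre ++ [v]).filter (fun u => (pvPartners v).contains (PySem.Int.mod u 120))
      = (pre ++ [v]).filter (fun u => pvCheck u v) :=
    List.filter_congr (fun u _ => (pv_check_mem_partners u v).symm)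
  have hfold := pv_partnerFold (pre ++ [v]) v _ hbuckets (pvPartners v) (pv_partners_nodup v)
    st.1 st.2.1
  rw [hFc] at hfold
  have hlenF : ((pre ++ [v]).filter (fun u => pvCheck u v)).length
      = ((PySem.List.pyRange 0 ((pre.length : Int) + 1) 1).filter
          (fun i => pvQ data (i, (pre.length : Int)))).length := by
    rw [hGmap, List.length_map]
  have hfoldF : ∀ m : Int,
      (((pre ++ [v]).filter (fun u => pvCheck u v)).map (· + v)).foldl max m
      = ((((PySem.List.pyRange 0 ((pre.length : Int) + 1) 1).filter
          (fun i => pvQ data (i, (pre.length : Int)))).map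
            (fun i => (i, (pre.length : Int)))).map (pvS data)).foldl max m := by
    intro m
    rw [hGmap, List.map_map, List.map_map]
    congr 1
    apply List.map_congr_left
    intro i _
    simp [Function.comp_apply, pvS, hv]
  simp only [pvStep, pvInv]
  rw [hfold, pv_LB_succ data pre.length]
  refine ⟨?_, ?_, fun r => by rw [htake1]; exact hbuckets r⟩
  · simp only [pvRowB, List.length_append, List.length_map]
    rw [hc, hlenF]
    push_cast
    ring
  · simp only [pvRowB, List.map_append, List.foldl_append]
    rw [← hm, hfoldF st.2.1]

lemma pv_Bloop (data : List Int) : ∀ (l pre : List Int), data = pre ++ l →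
    ∀ st, pvInv data pre.length st →
    pvInv data data.length (l.foldl pvStep st) := by
  intro l
  induction l with
  | nil =>
    intro pre hpre st hInv
    rw [List.append_nil] at hpre
    subst hpre
    simpa using hInv
  | cons v l' ih =>
    intro pre hpre st hInv
    rw [List.foldl_cons]
    have hstep := pv_step_inv data pre l' v hpre st hInv
    have hlen1 : pre.length + 1 = (pre ++ [v]).length := by simp
    rw [hlen1] at hstep
    exact ih (pre ++ [v]) (by simp [hpre]) _ hstep

lemma pv_alt_eq (data : List Int) :
    solution_alt data
      = (((pvLB data data.length).length : Int),
         ((pvLB data data.length).map (pvS data)).foldl max 0) := by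
  have h0 : pvInv data 0 ((0 : Int), (0 : Int), (PySem.Dict.empty : PySem.Dict Int (Int × Int))) := by
    refine ⟨?_, ?_, ?_⟩
    · simp [pvLB, PySem.List.pyRange_one_eq_nil (le_refl (0 : Int))]
    · simp [pvLB, PySem.List.pyRange_one_eq_nil (le_refl (0 : Int))]
    · intro r
      simp [pvBucket, PySem.Dict.get?_empty]
  have hfin := pv_Bloop data data [] rfl ((0 : Int), (0 : Int), PySem.Dict.empty) h0
  obtain ⟨hcnt, hmx, -⟩ := hfin
  unfold solution_alt
  exact Prod.ext hcnt hmx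

lemma pv_mem_rowA_fst (data : List Int) (i : Int) (p : Int × Int) (h : p ∈ pvRowA data i) :
    p.1 = i := by
  simp only [pvRowA, List.mem_map] at h
  obtain ⟨j, -, rfl⟩ := h
  rfl

lemma pv_mem_rowB_snd (data : List Int) (j : Int) (p : Int × Int) (h : p ∈ pvRowB data j) :
    p.2 = j := by
  simp only [pvRowB, List.mem_map] at h
  obtain ⟨i, -, rfl⟩ := h
  rfl

lemma pv_mem_LA (data : List Int) (p : Int × Int) :
    p ∈ pvLA data ↔
      (0 ≤ p.1 ∧ p.1 < (data.length : Int) - 1 ∧ p.1 ≤ p.2 ∧ p.2 < (data.length : Int) ∧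
        pvQ data p = true) := by
  rcases p with ⟨a, b⟩
  simp only [pvLA, pvRowA, List.mem_flatMap, List.mem_map, List.mem_filter,
    PySem.List.mem_pyRange_one, Prod.mk.injEq]
  constructor
  · rintro ⟨i, ⟨hi0, hi1⟩, j, ⟨⟨hj0, hj1⟩, hq⟩, rfl, rfl⟩
    exact ⟨hi0, hi1, hj0, hj1, hq⟩
  · rintro ⟨h0, h1, h2, h3, h4⟩
    exact ⟨a, ⟨h0, h1⟩, b, ⟨⟨h2, h3⟩, h4⟩, rfl, rfl⟩

lemma pv_mem_LB (data : List Int) (p : Int × Int) :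
    p ∈ pvLB data data.length ↔
      (0 ≤ p.1 ∧ p.1 ≤ p.2 ∧ p.2 < (data.length : Int) ∧ pvQ data p = true) := by
  rcases p with ⟨a, b⟩
  simp only [pvLB, pvRowB, List.mem_flatMap, List.mem_map, List.mem_filter,
    PySem.List.mem_pyRange_one, Prod.mk.injEq]
  constructor
  · rintro ⟨j, ⟨hj0, hj1⟩, i, ⟨⟨hi0, hi1⟩, hq⟩, rfl, rfl⟩
    exact ⟨hi0, by omega, hj1, hq⟩
  · rintro ⟨h0, h1, h2, h3⟩
    exact ⟨b, ⟨by omega, h2⟩, a, ⟨⟨h0, by omega⟩, h3⟩, rfl, rfl⟩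

lemma pv_LA_nodup (data : List Int) : (pvLA data).Nodup := by
  rw [pvLA, List.nodup_flatMap]
  constructor
  · intro i _
    exact (((PySem.List.nodup_pyRange_one _ _).filter _).map
      (fun a b hab => (Prod.ext_iff.mp hab).2))
  · refine (PySem.List.pairwise_lt_pyRange_one _ _).imp ?_
    intro i i' hlt
    intro x hx hx'
    have h1 := pv_mem_rowA_fst data i x hx
    have h2 := pv_mem_rowA_fst data i' x hx'
    omega

lemma pv_LB_nodup (data : List Int) : (pvLB data data.length).Nodup := by
  rw [pvLB, List.nodup_flatMap]
  constructor
  · intro j _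
    exact (((PySem.List.nodup_pyRange_one _ _).filter _).map
      (fun a b hab => (Prod.ext_iff.mp hab).1))
  · refine (PySem.List.pairwise_lt_pyRange_one _ _).imp ?_
    intro j j' hlt
    intro x hx hx'
    have h1 := pv_mem_rowB_snd data j x hx
    have h2 := pv_mem_rowB_snd data j' x hx'
    omega

-- the last value of the list, as B's query sees it
lemma pv_last (data : List Int) (h : data ≠ []) :
    pvG data ((data.length : Int) - 1) = data.getLast?.getD 1 := by
  have hlen : 0 < data.length := List.length_pos_iff.mpr h
  have hcast : ((data.length : Int) - 1) = (((data.length - 1 : Nat)) : Int) := by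
    push_cast [hlen]; ring
  rw [hcast]
  simp only [pvG, PySem.List.pyGetD_natCast]
  rw [List.getLast?_eq_getElem?]
  have hidx : data.length - 1 < data.length := by omega
  simp [List.getD, hidx]

-- Q on the diagonal at the last index decides D_
lemma pv_Q_last (data : List Int) (h : data ≠ []) :
    pvQ data ((data.length : Int) - 1, (data.length : Int) - 1) = true ↔ D_solution data := by
  simp only [pvQ, pv_check_diag, pv_last data h, D_solution, beq_iff_eq]

lemma pv_perm_notD (data : List Int) (hnD : ¬ D_solution data) :
    (pvLA data).Perm (pvLB data data.length) := by
  rw [List.perm_ext_iff_of_nodup (pv_LA_nodup data) (pv_LB_nodup data)]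
  intro p
  rw [pv_mem_LA, pv_mem_LB]
  constructor
  · rintro ⟨h1, h2, h3, h4, h5⟩
    exact ⟨h1, h3, h4, h5⟩
  · rintro ⟨h1, h2, h3, h4⟩
    refine ⟨h1, ?_, h2, h3, h4⟩
    by_contra hcon
    have hne : data ≠ [] := by
      rintro rfl
      simp at h3
      omega
    have hp : p = ((data.length : Int) - 1, (data.length : Int) - 1) := by
      rcases p with ⟨a, b⟩
      simp only [Prod.mk.injEq]
      constructor <;> [skip; skip] <;> simp only at h1 h2 h3 hcon <;> omega
    rw [hp] at h4
    exact hnD ((pv_Q_last data hne).mp h4)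

lemma pv_perm_D (data : List Int) (hD : D_solution data) (hne : data ≠ []) :
    (pvLB data data.length).Perm
      (((data.length : Int) - 1, (data.length : Int) - 1) :: pvLA data) := by
  have hlen : 0 < data.length := List.length_pos_iff.mpr hne
  have hnodup : (((data.length : Int) - 1, (data.length : Int) - 1) :: pvLA data).Nodup := by
    refine List.nodup_cons.mpr ⟨?_, pv_LA_nodup data⟩
    intro hmem
    rw [pv_mem_LA] at hmem
    obtain ⟨-, h2, -, -, -⟩ := hmem
    simp only at h2
    omega
  rw [List.perm_ext_iff_of_nodup (pv_LB_nodup data) hnodup]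
  intro p
  rw [List.mem_cons, pv_mem_LA, pv_mem_LB]
  constructor
  · rintro ⟨h1, h2, h3, h4⟩
    by_cases hcase : p.1 < (data.length : Int) - 1
    · exact Or.inr ⟨h1, hcase, h2, h3, h4⟩
    · left
      rcases p with ⟨a, b⟩
      simp only [Prod.mk.injEq]
      simp only at h1 h2 h3 hcase
      omega
  · rintro (rfl | ⟨h1, h2, h3, h4, h5⟩)
    · refine ⟨by simp only; omega, le_refl _, by simp only; omega, ?_⟩
      exact (pv_Q_last data hne).mpr hD
    · exact ⟨h1, h3, h4, h5⟩

-- ===== VERDICT (by name: the statements are the Claim_ definitions above) =====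
theorem solution_spec : Claim_unchanged_solution := by
  intro data _
  unfold Spec_solution
  intro hnD
  rw [pv_solution_eq, pv_alt_eq]
  have hperm := pv_perm_notD data hnD
  rw [hperm.length_eq,
    pv_foldl_max_perm (hperm.map (pvS data)) 0]

theorem solution_changed : Claim_changed_solution := by
  unfold Claim_changed_solution
  decide

theorem solution_tight : Claim_exact_solution := by
  intro data _ hD
  have hne : data ≠ [] := by
    intro hnil
    rw [hnil] at hD
    simp [D_solution, PySem.Int.mod] at hD
  have hperm := pv_perm_D data hD hne
  rw [pv_solution_eq, pv_alt_eq]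
  intro heq
  have hfst := congrArg Prod.fst heq
  simp only at hfst
  have hlen : (pvLB data data.length).length = (pvLA data).length + 1 := by
    rw [hperm.length_eq, List.length_cons]
  rw [hlen] at hfst
  push_cast at hfst
  omega
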